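-- pv_equiv track=rewrite | github.com/Vergil0327/leetcode-history | Two Pointers/2354. Number of Excellent Pairs/solution.py | countExcellentPairs
-- ===== SOURCE A (Python) =====
-- from typing import List
--
-- def countExcellentPairs(nums: List[int], k: int) -> int:
--     SET = set(nums)
--     arr = sorted([bin(num).count("1") for num in SET])
--     n = len(arr)
--
--     res = 0
--     j = n-1
--     for i in range(n):
--         while j >= 0 and arr[i] + arr[j] >= k:
--             j -= 1
--         res += n-1-j
--
--     return res
-- ===== SOURCE B (Python) =====
-- def countExcellentPairs(nums, k):
--     freq = {}
--     for num in set(nums):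
--         p = bin(num).count("1")
--         freq[p] = freq.get(p, 0) + 1
--     res = 0
--     for a, ca in freq.items():
--         for b, cb in freq.items():
--             if a + b >= k:
--                 res += ca * cb
--     return res
-- ===== Notes on version B (the rewrite author's own statement) =====
-- stated objective: alternative
-- what changed: Replaces A's sort of the distinct numbers' popcounts plus a two-pointer sweep by a popcount-frequency dictionary built in one pass and a pairwise product sum over its few distinct entries.
import Mathlib
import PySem

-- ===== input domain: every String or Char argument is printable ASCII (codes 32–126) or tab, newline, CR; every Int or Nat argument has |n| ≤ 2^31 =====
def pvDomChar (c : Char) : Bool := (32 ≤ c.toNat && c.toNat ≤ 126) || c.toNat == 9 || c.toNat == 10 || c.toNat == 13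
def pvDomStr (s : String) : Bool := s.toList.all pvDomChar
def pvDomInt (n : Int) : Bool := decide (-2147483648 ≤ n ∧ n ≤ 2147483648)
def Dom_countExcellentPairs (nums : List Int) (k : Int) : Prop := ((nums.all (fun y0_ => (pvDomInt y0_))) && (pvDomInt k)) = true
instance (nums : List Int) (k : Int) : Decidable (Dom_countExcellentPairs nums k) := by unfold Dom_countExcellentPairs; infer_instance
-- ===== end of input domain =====

-- B replaces A's sort + two-pointer sweep over the distinct numbers' popcounts by a
-- popcount-frequency dictionary and a pairwise product sum over its entries; objective: alternative.

-- ===== PORT A =====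
-- the inner 'while j >= 0 and arr[i] + arr[j] >= k: j -= 1'
def aWhile (arr : List Int) (x k : Int) (j : Int) : Int :=
  if 0 ≤ j ∧ k ≤ x + PySem.List.pyGetD arr j 0 then aWhile arr x k (j - 1) else j
termination_by (j + 1).toNat
decreasing_by omega

def countExcellentPairs (nums : List Int) (k : Int) : Int :=
  let SET := PySem.Set.ofList nums
  let arr := PySem.List.sorted (SET.map (fun num => (PySem.Int.bitCount num : Int))) (fun x => x) false
  let n : Int := arr.length
  let st := (PySem.List.pyRange 0 n 1).foldl
    (fun (st : Int × Int) (i : Int) =>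
      let j := aWhile arr (PySem.List.pyGetD arr i 0) k st.2
      (st.1 + (n - 1 - j), j))
    (0, n - 1)
  st.1

-- ===== PORT B =====
def countExcellentPairs_alt (nums : List Int) (k : Int) : Int :=
  let freq : PySem.Dict Int Int :=
    (PySem.Set.ofList nums).foldl
      (fun d num =>
        let p : Int := (PySem.Int.bitCount num : Int)
        d.insert p (d.getD p 0 + 1))
      PySem.Dict.empty
  freq.items.foldl
    (fun res a =>
      freq.items.foldl
        (fun res b => if k ≤ a.1 + b.1 then res + a.2 * b.2 else res)
        res)
    0

-- ===== PRECONDITION & SPEC =====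
def Spec_countExcellentPairs (nums : List Int) (k : Int) (out : Int) : Prop := out = countExcellentPairs_alt nums k
instance (nums : List Int) (k : Int) (out : Int) : Decidable (Spec_countExcellentPairs nums k out) := by unfold Spec_countExcellentPairs; infer_instance

-- ===== CLAIM (what is proved, stated in full; the proofs are below) =====
def Claim_equal_countExcellentPairs : Prop := ∀ (nums : List Int) (k : Int), Dom_countExcellentPairs nums k → Spec_countExcellentPairs nums k (countExcellentPairs nums k)

-- ===== LEMMAS AND PROOFS =====

-- the canonical value both programs compute: the double indicator sum over the popcount list
def pairSum (L : List Int) (k : Int) : Int :=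
  (L.map (fun x => (L.map (fun y => if k ≤ x + y then (1 : Int) else 0)).sum)).sum

-- the inner sum of pairSum, i.e. the number of list elements y with k ≤ x + y
def indSum (arr : List Int) (k x : Int) : Int :=
  (arr.map (fun y => if k ≤ x + y then (1 : Int) else 0)).sum

-- the body of A's 'for i in range(n)' loop, with the two lets zeta-reduced
def stepA (arr : List Int) (k : Int) : Int × Int → Int → Int × Int :=
  fun st i =>
    (st.1 + ((arr.length : Int) - 1 - aWhile arr (PySem.List.pyGetD arr i 0) k st.2),
      aWhile arr (PySem.List.pyGetD arr i 0) k st.2)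

theorem getD_eq_getElem' (l : List Int) (t : Nat) (d : Int) (h : t < l.length) :
    l.getD t d = l[t] := by
  simp [List.getD_eq_getElem?_getD, List.getElem?_eq_getElem h]

-- the two-pointer inner while loop: it never rises, stops at -1 or below the threshold,
-- and every index skipped over satisfies the threshold
theorem aWhile_spec (arr : List Int) (x k : Int) :
    ∀ (N : Nat) (j : Int), (j + 1).toNat ≤ N → -1 ≤ j →
      (-1 ≤ aWhile arr x k j) ∧ (aWhile arr x k j ≤ j) ∧
      (¬(0 ≤ aWhile arr x k j ∧ k ≤ x + PySem.List.pyGetD arr (aWhile arr x k j) 0)) ∧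
      (∀ t : Nat, aWhile arr x k j < (t : Int) → (t : Int) ≤ j → k ≤ x + arr.getD t 0) := by
  intro N
  induction N with
  | zero =>
    intro j hN hj
    have hj' : j = -1 := by omega
    subst hj'
    have he : aWhile arr x k (-1) = -1 := by rw [aWhile]; norm_num
    rw [he]
    refine ⟨le_refl _, le_refl _, by norm_num, fun t ht ht' => by omega⟩
  | succ N ih =>
    intro j hN hj
    by_cases h : 0 ≤ j ∧ k ≤ x + PySem.List.pyGetD arr j 0
    · have he : aWhile arr x k j = aWhile arr x k (j - 1) := by rw [aWhile]; simp [h]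
      have hb : (j - 1 + 1).toNat ≤ N := by omega
      obtain ⟨i1, i2, i3, i4⟩ := ih (j - 1) hb (by omega)
      rw [he]
      refine ⟨i1, by omega, i3, fun t ht ht' => ?_⟩
      by_cases htj : (t : Int) ≤ j - 1
      · exact i4 t ht htj
      · have h0 : 0 ≤ j := h.1
        have hg : PySem.List.pyGetD arr j 0 = arr.getD j.toNat 0 :=
          PySem.List.pyGetD_of_nonneg arr 0 h0
        have hgt : arr.getD t 0 = arr.getD j.toNat 0 := by
          congr 1; omega
        rw [hgt, ← hg]; exact h.2
    · have he : aWhile arr x k j = j := by rw [aWhile]; simp [h]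
      rw [he]
      exact ⟨hj, le_refl _, h, fun t ht ht' => by omega⟩

-- if the indicator predicate holds exactly above the frontier j', indSum counts n - 1 - j'
theorem indSum_eq (arr : List Int) (k x : Int) (j' : Int) (h1 : -1 ≤ j') (h2 : j' < (arr.length : Int))
    (hup : ∀ t : Nat, t < arr.length → j' < (t : Int) → k ≤ x + arr.getD t 0)
    (hdown : ∀ t : Nat, t < arr.length → (t : Int) ≤ j' → ¬ k ≤ x + arr.getD t 0) :
    indSum arr k x = (arr.length : Int) - 1 - j' := by
  set m := (j' + 1).toNat with hm
  have hmi : (m : Int) = j' + 1 := by omega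
  have hmn : m ≤ arr.length := by omega
  rw [indSum]
  conv_lhs => rw [← List.take_append_drop m arr]
  rw [List.map_append, List.sum_append]
  have h0 : ((arr.take m).map (fun y => if k ≤ x + y then (1 : Int) else 0)).sum = 0 := by
    have : (arr.take m).map (fun y => if k ≤ x + y then (1 : Int) else 0)
        = (arr.take m).map (fun _ => 0) := by
      refine List.map_congr_left fun y hy => ?_
      obtain ⟨i, hi, rfl⟩ := List.mem_iff_getElem.mp hy
      have hilen : i < arr.length := by
        have := hi; simp [List.length_take] at this; omega
      rw [List.getElem_take]
      have : ¬ k ≤ x + arr.getD i 0 := by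
        refine hdown i hilen ?_
        have : i < m := by have := hi; simp [List.length_take] at this; omega
        omega
      rw [getD_eq_getElem' arr i 0 hilen] at this
      simp [this]
    rw [this]; simp
  have h1' : ((arr.drop m).map (fun y => if k ≤ x + y then (1 : Int) else 0)).sum
      = ((arr.length - m : Nat) : Int) := by
    have heq : (arr.drop m).map (fun y => if k ≤ x + y then (1 : Int) else 0)
        = (arr.drop m).map (fun _ => 1) := by
      refine List.map_congr_left fun y hy => ?_
      obtain ⟨i, hi, rfl⟩ := List.mem_iff_getElem.mp hy
      have hilen : m + i < arr.length := by
        have := hi; simp [List.length_drop] at this; omega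
      rw [List.getElem_drop]
      have : k ≤ x + arr.getD (m + i) 0 := hup (m + i) hilen (by omega)
      rw [getD_eq_getElem' arr (m + i) 0 hilen] at this
      simp [this]
    rw [heq]
    simp
  rw [h0, h1']
  omega

-- the invariant of A's outer loop: the accumulated result counts the processed prefix,
-- and everything above the frontier satisfies the threshold for all later rows
theorem loopA (arr : List Int) (k : Int) (hpw : arr.Pairwise (· ≤ ·)) :
    ∀ i : Nat, i ≤ arr.length →
      ((PySem.List.pyRange 0 (i : Int) 1).foldl (stepA arr k) (0, (arr.length : Int) - 1)).1
          = ((arr.take i).map (indSum arr k)).sum ∧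
      -1 ≤ ((PySem.List.pyRange 0 (i : Int) 1).foldl (stepA arr k) (0, (arr.length : Int) - 1)).2 ∧
      ((PySem.List.pyRange 0 (i : Int) 1).foldl (stepA arr k) (0, (arr.length : Int) - 1)).2 < (arr.length : Int) ∧
      (∀ t : Nat, t < arr.length →
        ((PySem.List.pyRange 0 (i : Int) 1).foldl (stepA arr k) (0, (arr.length : Int) - 1)).2 < (t : Int) →
        ∀ m : Nat, i ≤ m → m < arr.length → k ≤ arr.getD m 0 + arr.getD t 0) := by
  have hmono : ∀ a b : Nat, a ≤ b → b < arr.length → arr.getD a 0 ≤ arr.getD b 0 := by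
    intro a b hab hb
    rcases Nat.eq_or_lt_of_le hab with rfl | hlt
    · exact le_refl _
    · have ha : a < arr.length := by omega
      rw [getD_eq_getElem' arr a 0 ha, getD_eq_getElem' arr b 0 hb]
      exact (List.pairwise_iff_getElem.mp hpw) a b ha hb hlt
  intro i
  induction i with
  | zero =>
    intro _
    have hnil : PySem.List.pyRange 0 ((0 : Nat) : Int) 1 = [] := by
      rw [PySem.List.pyRange_zero_natCast]
      simp
    rw [hnil]
    refine ⟨by simp, by simp only [List.foldl_nil]; omega, by simp only [List.foldl_nil]; omega, fun t ht h2 m hm hm2 => ?_⟩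
    simp only [List.foldl_nil] at h2
    omega
  | succ i ih =>
    intro hi1
    have hi : i < arr.length := by omega
    obtain ⟨s1, s2, s3, s4⟩ := ih (by omega)
    have hcast : (((i + 1 : Nat)) : Int) = (i : Int) + 1 := by push_cast; ring
    have hunf : (PySem.List.pyRange 0 ((i + 1 : Nat) : Int) 1).foldl (stepA arr k) (0, (arr.length : Int) - 1)
        = stepA arr k ((PySem.List.pyRange 0 (i : Int) 1).foldl (stepA arr k) (0, (arr.length : Int) - 1)) (i : Int) := by
      rw [hcast, PySem.List.pyRange_one_succ_right (by positivity), List.foldl_append]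
      rfl
    set st := (PySem.List.pyRange 0 (i : Int) 1).foldl (stepA arr k) (0, (arr.length : Int) - 1) with hst
    have hx : PySem.List.pyGetD arr ((i : Nat) : Int) 0 = arr.getD i 0 :=
      PySem.List.pyGetD_natCast arr i 0
    obtain ⟨w1, w2, w3, w4⟩ := aWhile_spec arr (arr.getD i 0) k (st.2 + 1).toNat st.2 (le_refl _) s2
    have hj'lt : aWhile arr (arr.getD i 0) k st.2 < (arr.length : Int) := by omega
    have hup : ∀ t : Nat, t < arr.length → aWhile arr (arr.getD i 0) k st.2 < (t : Int) →
        k ≤ arr.getD i 0 + arr.getD t 0 := by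
      intro t ht htj
      by_cases hc : (t : Int) ≤ st.2
      · exact w4 t htj hc
      · have := s4 t ht (by omega) i (le_refl _) hi
        linarith
    have hdown : ∀ t : Nat, t < arr.length → (t : Int) ≤ aWhile arr (arr.getD i 0) k st.2 →
        ¬ k ≤ arr.getD i 0 + arr.getD t 0 := by
      intro t ht htj hk
      have h0 : (0 : Int) ≤ aWhile arr (arr.getD i 0) k st.2 := by omega
      have hjn : (aWhile arr (arr.getD i 0) k st.2).toNat < arr.length := by omega
      have hgd : PySem.List.pyGetD arr (aWhile arr (arr.getD i 0) k st.2) 0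
          = arr.getD (aWhile arr (arr.getD i 0) k st.2).toNat 0 :=
        PySem.List.pyGetD_of_nonneg arr 0 h0
      have hle : arr.getD t 0 ≤ arr.getD (aWhile arr (arr.getD i 0) k st.2).toNat 0 :=
        hmono t _ (by omega) hjn
      exact w3 ⟨h0, by rw [hgd]; linarith⟩
    have hcnt : indSum arr k (arr.getD i 0) = (arr.length : Int) - 1 - aWhile arr (arr.getD i 0) k st.2 :=
      indSum_eq arr k (arr.getD i 0) _ w1 hj'lt hup hdown
    rw [hunf, stepA]
    simp only [hx]
    refine ⟨?_, by omega, by omega, ?_⟩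
    · rw [s1, ← hcnt]
      have htake : arr.take (i + 1) = arr.take i ++ [arr[i]] := by
        rw [List.take_add_one, List.getElem?_eq_getElem hi]
        rfl
      rw [htake, List.map_append, List.sum_append]
      rw [getD_eq_getElem' arr i 0 hi]
      simp
    · intro t ht htj m hm hm2
      have h1 := hup t ht htj
      have h2 := hmono i m (by omega) hm2
      linarith

theorem A_eq_pairSum (nums : List Int) (k : Int) :
    countExcellentPairs nums k
      = pairSum (PySem.List.sorted ((PySem.Set.ofList nums).map (fun num => (PySem.Int.bitCount num : Int))) (fun x => x) false) k := by
  set arr := PySem.List.sorted ((PySem.Set.ofList nums).map (fun num => (PySem.Int.bitCount num : Int))) (fun x => x) false with harr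
  have hpw : arr.Pairwise (· ≤ ·) := by
    have := PySem.List.sorted_pairwise ((PySem.Set.ofList nums).map (fun num => (PySem.Int.bitCount num : Int))) (fun x => x)
    simpa [harr] using this
  have hmain := (loopA arr k hpw arr.length (le_refl _)).1
  show ((PySem.List.pyRange 0 (arr.length : Int) 1).foldl (stepA arr k) (0, (arr.length : Int) - 1)).1
      = pairSum arr k
  rw [hmain, List.take_length]
  rfl

theorem pairSum_perm {L L' : List Int} (h : L.Perm L') (k : Int) : pairSum L k = pairSum L' k := by
  unfold pairSum
  have hinner : ∀ x : Int,
      (L.map (fun y => if k ≤ x + y then (1 : Int) else 0)).sum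
        = (L'.map (fun y => if k ≤ x + y then (1 : Int) else 0)).sum :=
    fun x => (h.map _).sum_eq
  calc (L.map (fun x => (L.map (fun y => if k ≤ x + y then (1 : Int) else 0)).sum)).sum
      = (L.map (fun x => (L'.map (fun y => if k ≤ x + y then (1 : Int) else 0)).sum)).sum :=
        congrArg List.sum (List.map_congr_left fun x _ => hinner x)
    _ = (L'.map (fun x => (L'.map (fun y => if k ≤ x + y then (1 : Int) else 0)).sum)).sum :=
        (h.map _).sum_eq

-- 'if c: res += v' inside a fold is the sum of the if-else-0 map
theorem foldl_ite_add {α : Type} (l : List α) (p : α → Prop) [DecidablePred p] (v : α → Int) (a : Int) :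
    l.foldl (fun r x => if p x then r + v x else r) a = a + (l.map (fun x => if p x then v x else 0)).sum := by
  induction l generalizing a with
  | nil => simp
  | cons x t ih =>
    simp only [List.foldl_cons, List.map_cons, List.sum_cons, ih]
    split <;> ring

-- the count-weighted sum over the distinct elements equals the plain sum over the list
theorem sum_ofList_count (L : List Int) (g : Int → Int) :
    ((PySem.Set.ofList L).map (fun p => (L.count p : Int) * g p)).sum = (L.map g).sum := by
  have hn : (PySem.Set.ofList L).Nodup := PySem.Set.nodup_ofList L
  have hset : (PySem.Set.ofList L).toFinset = L.toFinset := by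
    ext x; simp [PySem.Set.mem_ofList]
  rw [← List.sum_toFinset _ hn, hset, Finset.sum_list_map_count]
  refine Finset.sum_congr rfl fun m _ => ?_
  simp

theorem B_eq_pairSum (nums : List Int) (k : Int) :
    countExcellentPairs_alt nums k
      = pairSum ((PySem.Set.ofList nums).map (fun num => (PySem.Int.bitCount num : Int))) k := by
  set L := (PySem.Set.ofList nums).map (fun num => (PySem.Int.bitCount num : Int)) with hL
  have hfreq : (PySem.Set.ofList nums).foldl
      (fun d num =>
        let p : Int := (PySem.Int.bitCount num : Int)
        d.insert p (d.getD p 0 + 1))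
      PySem.Dict.empty = PySem.Dict.counter L := by
    rw [hL, ← PySem.Dict.foldl_insert_getD_add_one_eq_counter, List.foldl_map]
  rw [countExcellentPairs_alt, hfreq, PySem.Dict.items_counter]
  simp only [foldl_ite_add, PySem.List.foldl_add, List.map_map, zero_add]
  rw [pairSum]
  have hinner : ∀ p : Int,
      ((PySem.Set.ofList L).map
        (fun q => if k ≤ p + q then (L.count p : Int) * (L.count q : Int) else 0)).sum
      = (L.count p : Int) * (L.map (fun y => if k ≤ p + y then (1 : Int) else 0)).sum := by
    intro p
    rw [← sum_ofList_count L (fun y => if k ≤ p + y then (1 : Int) else 0)]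
    rw [← List.sum_map_mul_left]
    congr 1
    refine List.map_congr_left fun q _ => ?_
    split <;> ring
  calc ((PySem.Set.ofList L).map
          (fun a => ((PySem.Set.ofList L).map
            (fun b => if k ≤ a + b then (L.count a : Int) * (L.count b : Int) else 0)).sum)).sum
      = ((PySem.Set.ofList L).map
          (fun p => (L.count p : Int) * (L.map (fun y => if k ≤ p + y then (1 : Int) else 0)).sum)).sum := by
        exact congrArg List.sum (List.map_congr_left fun p _ => hinner p)
    _ = (L.map (fun x => (L.map (fun y => if k ≤ x + y then (1 : Int) else 0)).sum)).sum :=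
        sum_ofList_count L _

-- ===== VERDICT (by name: the statement is the Claim_ definition above) =====
theorem countExcellentPairs_spec : Claim_equal_countExcellentPairs := by
  intro nums k _
  unfold Spec_countExcellentPairs
  rw [A_eq_pairSum, B_eq_pairSum,
    pairSum_perm (PySem.List.sorted_perm (xs := (PySem.Set.ofList nums).map (fun num => (PySem.Int.bitCount num : Int))) (key := fun x => x) (rev := false))]
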